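-- pv_equiv track=rewrite | github.com/azagsam/graph-based-visualization-docker | utils/helpers.py | get_context_for_sentences
-- ===== SOURCE A (Python) =====
-- def get_context_for_sentences(sentences, n=1):
--     context = []
--     for idx, sent in enumerate(sentences):
--         if idx == 0:
--             context.append('LEAD : ' + sent)
--         elif idx == len(sentences) - 1:
--             context.append('END : ' + sent)
--             break
--         else:
--             if idx-n < 0:
--                 sent_before = '<br>'.join(sentences[:idx])
--                 sent_after = '<br>'.join(sentences[idx+1:idx+n+1])
--             elif idx+n > len(sentences):
--                 sent_before = '<br>'.join(sentences[idx-n:idx])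
--                 sent_after = '<br>'.join(sentences[idx+1:])
--             else:
--                 sent_before = '<br>'.join(sentences[idx-n:idx])
--                 sent_after = '<br>'.join(sentences[idx+1:idx+n+1])
--             # build context
--             p = sent_before + '<br><br>' + str(idx) + ' : ' + sent + '<br><br>' + sent_after
--             context.append(p)
--     return context
-- ===== SOURCE B (Python) =====
-- def get_context_for_sentences(sentences, n=1):
--     L = len(sentences)
--     if L == 0:
--         return []
--     if L == 1:
--         return ['LEAD : ' + sentences[0]]
--     # staged pass 1: befores[i] = '<br>'.join of the up-to-n sentences before i,
--     # maintained as a sliding window (no per-index slicing of `sentences`)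
--     befores = []
--     win = []
--     for s in sentences:
--         befores.append('<br>'.join(win))
--         win.append(s)
--         if len(win) > n:
--             win.pop(0)
--     # staged pass 2 (backwards): afters[i] = '<br>'.join of the up-to-n sentences after i
--     rev = []
--     win = []
--     for s in reversed(sentences):
--         rev.append('<br>'.join(win))
--         win.insert(0, s)
--         if len(win) > n:
--             win.pop()
--     afters = rev[::-1]
--     # assembly
--     mids = [befores[i] + '<br><br>' + str(i) + ' : ' + sentences[i] + '<br><br>' + afters[i]
--             for i in range(1, L - 1)]
--     return ['LEAD : ' + sentences[0]] + mids + ['END : ' + sentences[-1]]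
-- ===== Notes on version B (the rewrite author's own statement) =====
-- stated objective: alternative
-- what changed: B replaces A's single enumerate+break loop with per-index branchy absolute slicing by a staged pipeline: a forward sliding-window pass builds a befores array, a backward sliding-window pass builds an afters array (windows maintained incrementally by append/pop, no slicing of sentences), and a final assembly step zips them with the middle indices.
-- intended difference: When n <= -3 and the wrapped slice is actually nonempty (2-len(sentences) <= n, or n == 1-len(sentences) with some sentence in positions 2..len-2 nonempty), A's middle-slice stop idx+n+1 goes negative and Python wraps it to the end of the list, so A pastes unrelated trailing text into the 'following context'; B returns the empty following context there, the intended meaning of a non-positive window. — e.g. on get_context_for_sentences(["a", "b", "c", "d"], -3): A returns ["LEAD : a", "<br><br>1 : b<br><br>c", "<br><br>2 : c<br><br>", "END : d"], B returns ["LEAD : a", "<br><br>1 : b<br><br>", "<br><br>2 : c<br><br>", "END : d"]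
import Mathlib
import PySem

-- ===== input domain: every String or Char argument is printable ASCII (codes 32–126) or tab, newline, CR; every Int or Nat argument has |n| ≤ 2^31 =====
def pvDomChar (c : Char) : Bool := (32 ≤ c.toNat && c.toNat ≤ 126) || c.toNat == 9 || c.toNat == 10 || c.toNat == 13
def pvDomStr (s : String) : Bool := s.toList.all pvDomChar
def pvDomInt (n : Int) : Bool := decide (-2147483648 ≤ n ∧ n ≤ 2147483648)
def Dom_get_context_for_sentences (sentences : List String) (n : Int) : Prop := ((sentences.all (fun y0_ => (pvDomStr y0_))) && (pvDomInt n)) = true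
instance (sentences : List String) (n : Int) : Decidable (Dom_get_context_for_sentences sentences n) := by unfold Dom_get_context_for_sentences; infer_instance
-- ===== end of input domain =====

-- B rebuilds the result as a staged pipeline (forward sliding-window pass for the 'before'
-- contexts, backward sliding-window pass for the 'after' contexts, then an assembly step)
-- instead of A's single enumerate+break loop with per-index branchy slicing; for n ≤ -3 with
-- -len < n A's wrapped negative slice stop pastes trailing sentences in, B leaves it empty (D_).

-- ===== PORT A =====
-- the for-loop over enumerate(sentences), with its `break`, as structural recursion on the
-- enumerated list; `context.append` ↔ cons-and-continue, `break` ↔ stop recursing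
def gcsA_go (sentences : List String) (n : Int) : List (Int × String) → List String
  | [] => []
  | (idx, sent) :: rest =>
    if idx = 0 then
      ("LEAD : " ++ sent) :: gcsA_go sentences n rest
    else if idx = (sentences.length : Int) - 1 then
      ["END : " ++ sent]
    else
      let sb_sa :=
        if idx - n < 0 then
          (PySem.Str.join "<br>" (PySem.List.slice sentences none (some idx)),
           PySem.Str.join "<br>" (PySem.List.slice sentences (some (idx + 1)) (some (idx + n + 1))))
        else if idx + n > (sentences.length : Int) then
          (PySem.Str.join "<br>" (PySem.List.slice sentences (some (idx - n)) (some idx)),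
           PySem.Str.join "<br>" (PySem.List.slice sentences (some (idx + 1)) none))
        else
          (PySem.Str.join "<br>" (PySem.List.slice sentences (some (idx - n)) (some idx)),
           PySem.Str.join "<br>" (PySem.List.slice sentences (some (idx + 1)) (some (idx + n + 1))))
      (sb_sa.1 ++ "<br><br>" ++ PySem.Int.toStr idx ++ " : " ++ sent ++ "<br><br>" ++ sb_sa.2)
        :: gcsA_go sentences n rest

def get_context_for_sentences (sentences : List String) (n : Int) : List String :=
  gcsA_go sentences n (PySem.List.enumerate sentences 0)

-- ===== PORT B =====
-- pass-1 window update: win.append(s); if len(win) > n: win.pop(0)  (pop(0) of the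
-- nonempty win ++ [s] is exactly `drop 1`)
def gcsB_bwin (n : Int) (win : List String) (s : String) : List String :=
  let w := win ++ [s]
  if (w.length : Int) > n then w.drop 1 else w

-- pass 1: for s in sentences: befores.append(join(win)); update win
def gcsB_bef (n : Int) : List String → List String → List String
  | _, [] => []
  | win, s :: rest => PySem.Str.join "<br>" win :: gcsB_bef n (gcsB_bwin n win s) rest

-- pass-2 window update: win.insert(0, s); if len(win) > n: win.pop()  (pop() of the
-- nonempty s :: win is exactly `dropLast`)
def gcsB_awin (n : Int) (win : List String) (s : String) : List String :=
  let w := s :: win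
  if (w.length : Int) > n then w.dropLast else w

-- pass 2: for s in reversed(sentences): rev.append(join(win)); update win
def gcsB_aft (n : Int) : List String → List String → List String
  | _, [] => []
  | win, s :: rest => PySem.Str.join "<br>" win :: gcsB_aft n (gcsB_awin n win s) rest

def get_context_for_sentences_alt (sentences : List String) (n : Int) : List String :=
  match sentences with
  | [] => []
  | [s0] => ["LEAD : " ++ s0]
  | s0 :: _ :: _ =>
    let befores := gcsB_bef n [] sentences
    let afters := (gcsB_aft n [] sentences.reverse).reverse
    let mids := (PySem.List.pyRange 1 ((sentences.length : Int) - 1) 1).map (fun i =>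
      PySem.List.pyGetD befores i "" ++ "<br><br>" ++ PySem.Int.toStr i ++ " : "
        ++ PySem.List.pyGetD sentences i "" ++ "<br><br>" ++ PySem.List.pyGetD afters i "")
    ("LEAD : " ++ s0) :: mids ++ ["END : " ++ PySem.List.pyGetD sentences (-1) ""]

-- ===== PRECONDITION & SPEC =====
-- When n ≤ -3 and the wrapped slice is nonempty (2-len ≤ n, or n = 1-len with some sentence in
-- positions 2..len-2 nonempty), A's middle-slice stop idx+n+1 goes negative and Python wraps it
-- to the end of the list, so A pastes unrelated trailing text into the 'following context';
-- B returns the empty following context there, the intended meaning of a non-positive window.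
def D_get_context_for_sentences (sentences : List String) (n : Int) : Prop :=
  3 ≤ sentences.length ∧ n ≤ -3 ∧
    (2 - (sentences.length : Int) ≤ n ∨
      (n = 1 - (sentences.length : Int) ∧
        ((sentences.drop 2).take (sentences.length - 3)).any (fun s => s != "") = true))
instance (sentences : List String) (n : Int) : Decidable (D_get_context_for_sentences sentences n) := by unfold D_get_context_for_sentences; infer_instance

def Spec_get_context_for_sentences (sentences : List String) (n : Int) (out : List String) : Prop := ¬ D_get_context_for_sentences sentences n → out = get_context_for_sentences_alt sentences n
instance (sentences : List String) (n : Int) (out : List String) : Decidable (Spec_get_context_for_sentences sentences n out) := by unfold Spec_get_context_for_sentences; infer_instance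

def pvDiffWitness_get_context_for_sentences : List String × Int := (["a", "b", "c", "d"], -3)
def pvDiffWitnessOut_get_context_for_sentences : (List String) × (List String) :=
  (["LEAD : a", "<br><br>1 : b<br><br>c", "<br><br>2 : c<br><br>", "END : d"],
   ["LEAD : a", "<br><br>1 : b<br><br>", "<br><br>2 : c<br><br>", "END : d"])

-- ===== CLAIM (what is proved, stated in full; the proofs are below) =====
def Claim_unchanged_get_context_for_sentences : Prop := ∀ (sentences : List String) (n : Int), Dom_get_context_for_sentences sentences n → Spec_get_context_for_sentences sentences n (get_context_for_sentences sentences n)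
def Claim_changed_get_context_for_sentences : Prop := Dom_get_context_for_sentences (pvDiffWitness_get_context_for_sentences.1) (pvDiffWitness_get_context_for_sentences.2) ∧ D_get_context_for_sentences (pvDiffWitness_get_context_for_sentences.1) (pvDiffWitness_get_context_for_sentences.2) ∧ get_context_for_sentences (pvDiffWitness_get_context_for_sentences.1) (pvDiffWitness_get_context_for_sentences.2) = pvDiffWitnessOut_get_context_for_sentences.1 ∧ get_context_for_sentences_alt (pvDiffWitness_get_context_for_sentences.1) (pvDiffWitness_get_context_for_sentences.2) = pvDiffWitnessOut_get_context_for_sentences.2 ∧ pvDiffWitnessOut_get_context_for_sentences.1 ≠ pvDiffWitnessOut_get_context_for_sentences.2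
def Claim_exact_get_context_for_sentences : Prop := ∀ (sentences : List String) (n : Int), Dom_get_context_for_sentences sentences n → D_get_context_for_sentences sentences n → get_context_for_sentences sentences n ≠ get_context_for_sentences_alt sentences n

-- ===== LEMMAS AND PROOFS =====

-- reference form of the middle entries (A's three slice branches collapsed; proof-only)
def gcsRef_mid (sentences : List String) (n idx : Int) : String :=
  let before := PySem.Str.join "<br>" (PySem.List.slice sentences (some (max 0 (idx - n))) (some idx))
  let after := PySem.Str.join "<br>" (PySem.List.slice sentences (some (idx + 1)) (some (idx + n + 1)))
  before ++ "<br><br>" ++ PySem.Int.toStr idx ++ " : " ++ PySem.List.pyGetD sentences idx ""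
    ++ "<br><br>" ++ after

-- reference form of the whole result (proof-only intermediate between the two ports)
def gcsRef (sentences : List String) (n : Int) : List String :=
  match sentences with
  | [] => []
  | s0 :: _ =>
    ("LEAD : " ++ s0)
      :: (PySem.List.pyRange 1 ((sentences.length : Int) - 1) 1).map (gcsRef_mid sentences n)
      ++ (if 1 < sentences.length then
            ["END : " ++ PySem.List.pyGetD sentences (-1) ""]
          else [])

-- A's middle-element slices equal the reference collapsed expressions, index by index
lemma mid_eq (S : List String) (n idx : Int) (h0 : 1 ≤ idx) (hlt : idx < (S.length : Int) - 1)
    (x : String) (hx : PySem.List.pyGetD S idx "" = x) :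
    (let sb_sa :=
        if idx - n < 0 then
          (PySem.Str.join "<br>" (PySem.List.slice S none (some idx)),
           PySem.Str.join "<br>" (PySem.List.slice S (some (idx + 1)) (some (idx + n + 1))))
        else if idx + n > (S.length : Int) then
          (PySem.Str.join "<br>" (PySem.List.slice S (some (idx - n)) (some idx)),
           PySem.Str.join "<br>" (PySem.List.slice S (some (idx + 1)) none))
        else
          (PySem.Str.join "<br>" (PySem.List.slice S (some (idx - n)) (some idx)),
           PySem.Str.join "<br>" (PySem.List.slice S (some (idx + 1)) (some (idx + n + 1))))
     sb_sa.1 ++ "<br><br>" ++ PySem.Int.toStr idx ++ " : " ++ x ++ "<br><br>" ++ sb_sa.2)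
    = gcsRef_mid S n idx := by
  have hafter : (S.length : Int) < idx + n →
      PySem.List.slice S (some (idx + 1)) none
        = PySem.List.slice S (some (idx + 1)) (some (idx + n + 1)) := by
    intro hb
    rw [PySem.List.slice_from S (by omega), PySem.List.slice_toNat S (by omega) (by omega)]
    rw [List.take_of_length_le (by simp [List.length_drop]; omega)]
  unfold gcsRef_mid
  rw [hx]
  by_cases h1 : idx - n < 0
  · have hm : max 0 (idx - n) = 0 := by omega
    simp only [if_pos h1, hm, PySem.List.slice_zero_start]
  · have hm : max 0 (idx - n) = idx - n := by omega
    rw [hm]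
    by_cases h2 : idx + n > (S.length : Int)
    · simp only [if_neg h1, if_pos h2]
      rw [hafter (by omega)]
    · simp only [if_neg h1, if_neg h2]

-- the tail of A's loop (indices k, k+1, …) produces the reference middle strings + END entry
lemma go_spec (S : List String) (n : Int) :
    ∀ (l : List String) (x : String) (k : Int), 1 ≤ k →
      k + ((x :: l).length : Int) = (S.length : Int) →
      x :: l = S.drop k.toNat →
      gcsA_go S n (PySem.List.enumerate (x :: l) k)
        = (PySem.List.pyRange k ((S.length : Int) - 1) 1).map (gcsRef_mid S n)
            ++ ["END : " ++ (x :: l).getLast (by simp)] := by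
  intro l
  induction l with
  | nil =>
    intro x k hk hlen _
    have hkeq : k = (S.length : Int) - 1 := by simp at hlen; omega
    rw [PySem.List.enumerate_cons]
    simp only [gcsA_go, if_neg (by omega : ¬ k = 0), if_pos hkeq,
      PySem.List.pyRange_one_eq_nil (le_of_eq hkeq.symm)]
    simp
  | cons y ys ih =>
    intro x k hk hlen hdrop
    have hlt : k.toNat < S.length := by simp at hlen; omega
    have hkx : PySem.List.pyGetD S k "" = x := by
      rw [PySem.List.pyGetD_eq_getElem S "" (by omega) (by omega)]
      have hgd := List.getElem_cons_drop (as := S) (i := k.toNat) hlt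
      rw [← hdrop] at hgd
      exact ((List.cons.injEq _ _ _ _ ▸ hgd.symm).1).symm
    have hklt : k < (S.length : Int) - 1 := by simp at hlen; omega
    rw [PySem.List.enumerate_cons]
    simp only [gcsA_go, if_neg (by omega : ¬ k = 0),
      if_neg (by omega : ¬ k = (S.length : Int) - 1)]
    rw [mid_eq S n k hk hklt x hkx]
    have hys : y :: ys = S.drop (k + 1).toNat := by
      have h1 : (k + 1).toNat = k.toNat + 1 := by omega
      rw [h1, ← List.drop_drop, ← hdrop]
      simp
    rw [ih y (k + 1) (by omega) (by simp at hlen ⊢; omega) hys]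
    rw [PySem.List.pyRange_one_cons hklt, List.map_cons]
    simp [List.getLast_cons]

-- port A computes the reference form, on every input
lemma A_eq_ref (sentences : List String) (n : Int) :
    get_context_for_sentences sentences n = gcsRef sentences n := by
  cases sentences with
  | nil => simp [get_context_for_sentences, gcsRef, PySem.List.enumerate, gcsA_go]
  | cons s0 rest =>
    unfold get_context_for_sentences gcsRef
    rw [PySem.List.enumerate_cons]
    simp only [gcsA_go, reduceIte]
    have h01 : (0 : Int) + 1 = 1 := by norm_num
    rw [h01]
    cases rest with
    | nil =>
      simp [PySem.List.enumerate, gcsA_go, PySem.List.pyRange_one_eq_nil]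
    | cons r1 rs =>
      rw [go_spec (s0 :: r1 :: rs) n rs r1 1 (by omega) (by simp; omega) (by simp)]
      rw [if_pos (by simp)]
      congr 2
      rw [PySem.List.pyGetD_neg_one _ "" (by simp)]
      simp [List.getLast_cons]

-- pass-1 window invariant: one update step keeps win = last ≤n.toNat of the processed prefix
lemma bef_step (S : List String) (n : Int) (i : Nat) (hi : i < S.length) :
    gcsB_bwin n ((S.take i).drop (i - n.toNat)) S[i] = (S.take (i + 1)).drop (i + 1 - n.toNat) := by
  have htake : S.take (i + 1) = S.take i ++ [S[i]] := by
    rw [List.take_add_one]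
    simp [List.getElem?_eq_getElem hi]
  have hlen : (S.take i).length = i := by simp; omega
  have hw : (S.take i).drop (i - n.toNat) ++ [S[i]] = (S.take (i + 1)).drop (i - n.toNat) := by
    rw [htake, List.drop_append_of_le_length (by omega)]
  have hwlen : ((S.take i).drop (i - n.toNat) ++ [S[i]]).length = i - (i - n.toNat) + 1 := by
    simp [hlen]
  unfold gcsB_bwin
  simp only []
  by_cases hc : ((((S.take i).drop (i - n.toNat) ++ [S[i]]).length : Int) > n)
  · rw [if_pos hc, hw, List.drop_drop]
    rw [hwlen] at hc
    congr 1
    omega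
  · rw [if_neg hc, hw]
    rw [hwlen] at hc
    congr 1
    omega

-- pass 1 computes, for every position j, the join of the ≤n.toNat sentences before j
lemma bef_go (S : List String) (n : Int) :
    ∀ (rest win : List String) (i : Nat), rest = S.drop i →
      win = (S.take i).drop (i - n.toNat) →
      gcsB_bef n win rest
        = (List.range rest.length).map
            (fun j => PySem.Str.join "<br>" ((S.take (i + j)).drop (i + j - n.toNat))) := by
  intro rest
  induction rest with
  | nil => intro win i _ _; simp [gcsB_bef]
  | cons s rest' ih =>
    intro win i hdrop hwin
    have hiL : i < S.length := by
      rcases Nat.lt_or_ge i S.length with h | h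
      · exact h
      · rw [List.drop_eq_nil_of_le h] at hdrop
        exact absurd hdrop (List.cons_ne_nil _ _)
    have hgd := List.getElem_cons_drop (as := S) (i := i) hiL
    rw [← hdrop] at hgd
    have hs : s = S[i] := ((List.cons.injEq _ _ _ _ ▸ hgd.symm).1)
    have hrest' : rest' = S.drop (i + 1) := ((List.cons.injEq _ _ _ _ ▸ hgd.symm).2)
    simp only [gcsB_bef]
    rw [hwin, hs, bef_step S n i hiL]
    rw [ih ((S.take (i + 1)).drop (i + 1 - n.toNat)) (i + 1) hrest' rfl]
    simp only [List.length_cons]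
    rw [List.range_succ_eq_map]
    simp only [List.map_cons, List.map_map, Nat.add_zero]
    congr 1
    exact List.map_congr_left (fun j _ => by
      have h' : i + 1 + j = i + (j + 1) := by omega
      simp [Function.comp, h'])

lemma bef_spec (S : List String) (n : Int) :
    gcsB_bef n [] S
      = (List.range S.length).map
          (fun j => PySem.Str.join "<br>" ((S.take j).drop (j - n.toNat))) := by
  have h := bef_go S n S [] 0 (by simp) (by simp)
  simpa using h

-- pass-2 window invariant
lemma aft_step (S : List String) (n : Int) (k : Nat) (hk : k < S.length) :
    gcsB_awin n ((S.drop (S.length - k)).take n.toNat) S[S.length - 1 - k] =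
      (S.drop (S.length - (k + 1))).take n.toNat := by
  have hdc : S.drop (S.length - 1 - k) = S[S.length - 1 - k] :: S.drop (S.length - k) := by
    have h2 : S.length - 1 - k + 1 = S.length - k := by omega
    rw [List.drop_eq_getElem_cons (by omega), h2]
  have htlen : (S.drop (S.length - k)).length = k := by simp; omega
  have hw : S[S.length - 1 - k] :: (S.drop (S.length - k)).take n.toNat
      = (S.drop (S.length - 1 - k)).take (n.toNat + 1) := by
    rw [hdc, List.take_succ_cons]
  have h1 : S.length - (k + 1) = S.length - 1 - k := by omega
  have hwlen : (S[S.length - 1 - k] :: (S.drop (S.length - k)).take n.toNat).length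
      = min n.toNat k + 1 := by simp [htlen]
  unfold gcsB_awin
  simp only []
  by_cases hc : (((S[S.length - 1 - k] :: (S.drop (S.length - k)).take n.toNat).length : Int) > n)
  · rw [if_pos hc, hw, h1]
    rw [hwlen] at hc
    have hNk : n.toNat ≤ k := by omega
    have hl : ((S.drop (S.length - 1 - k)).take (n.toNat + 1)).length = n.toNat + 1 := by
      simp
      omega
    rw [List.dropLast_eq_take, hl, List.take_take]
    simp
  · rw [if_neg hc, hw, h1]
    rw [hwlen] at hc
    have hkN : k + 1 ≤ n.toNat := by omega
    have hl2 : (S.drop (S.length - 1 - k)).length = k + 1 := by simp; omega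
    rw [List.take_of_length_le (by omega), List.take_of_length_le (by omega)]

-- pass 2 computes, scanning backwards, the join of the ≤n.toNat sentences after each position
lemma aft_go (S : List String) (n : Int) :
    ∀ (rest win : List String) (k : Nat), rest = S.reverse.drop k →
      win = (S.drop (S.length - k)).take n.toNat →
      gcsB_aft n win rest
        = (List.range rest.length).map
            (fun j => PySem.Str.join "<br>" ((S.drop (S.length - (k + j))).take n.toNat)) := by
  intro rest
  induction rest with
  | nil => intro win k _ _; simp [gcsB_aft]
  | cons s rest' ih =>
    intro win k hdrop hwin
    have hkL : k < S.length := by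
      rcases Nat.lt_or_ge k S.length with h | h
      · exact h
      · rw [List.drop_eq_nil_of_le (by simpa using h)] at hdrop
        exact absurd hdrop (List.cons_ne_nil _ _)
    have hgd := List.getElem_cons_drop (as := S.reverse) (i := k) (by simpa using hkL)
    rw [← hdrop] at hgd
    have hs : s = S.reverse[k]'(by simpa using hkL) := ((List.cons.injEq _ _ _ _ ▸ hgd.symm).1)
    have hrest' : rest' = S.reverse.drop (k + 1) := ((List.cons.injEq _ _ _ _ ▸ hgd.symm).2)
    have hsv : s = S[S.length - 1 - k]'(by omega) := by
      rw [hs, List.getElem_reverse]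
    simp only [gcsB_aft]
    rw [hwin, hsv, aft_step S n k hkL]
    rw [ih ((S.drop (S.length - (k + 1))).take n.toNat) (k + 1) hrest' rfl]
    simp only [List.length_cons]
    rw [List.range_succ_eq_map]
    simp only [List.map_cons, List.map_map, Nat.add_zero]
    congr 1
    exact List.map_congr_left (fun j _ => by
      have h' : k + 1 + j = k + (j + 1) := by omega
      simp [Function.comp, h'])

lemma aft_spec (S : List String) (n : Int) :
    gcsB_aft n [] S.reverse
      = (List.range S.length).map
          (fun j => PySem.Str.join "<br>" ((S.drop (S.length - j)).take n.toNat)) := by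
  have h := aft_go S n S.reverse [] 0 (by simp) (by simp)
  simpa using h

-- extraction: the befores entry at a middle index, in slice form
lemma bef_get (S : List String) (n : Int) (i : Int) (h1 : 1 ≤ i) (h2 : i < (S.length : Int) - 1) :
    PySem.List.pyGetD (gcsB_bef n [] S) i ""
      = PySem.Str.join "<br>" (PySem.List.slice S (some (max 0 (i - n))) (some i)) := by
  rw [bef_spec]
  rw [PySem.List.pyGetD_eq_getElem _ "" (by omega) (by simp; omega)]
  simp only [List.getElem_map, List.getElem_range]
  rw [PySem.List.slice_toNat S (by omega) (by omega)]
  suffices hli : (S.take i.toNat).drop (i.toNat - n.toNat)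
      = (S.drop ((max 0 (i - n)).toNat)).take (i.toNat - (max 0 (i - n)).toNat) by rw [hli]
  by_cases hn : 0 ≤ n
  · have ha : (max 0 (i - n)).toNat = i.toNat - n.toNat := by omega
    rw [ha, List.drop_take]
  · have hN : n.toNat = 0 := by omega
    have ha : i.toNat ≤ (max 0 (i - n)).toNat := by omega
    rw [hN, Nat.sub_zero, List.drop_eq_nil_of_le (by simp),
      Nat.sub_eq_zero_of_le ha, List.take_zero]

-- String/join/slice facts used by the negative-n analysis (tightness and aft_get)
lemma str_cancel (c x : String) (h : c ++ x = c ++ "") : x = "" := by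
  apply String.ext
  have h2 := congrArg String.toList h
  simpa using h2

lemma join_single (x : String) : PySem.Str.join "<br>" [x] = x := by
  apply String.ext
  rw [PySem.Str.toList_join]
  simp [PySem.Chars.join_singleton]

lemma join_two_ne (x y : String) (t : List String) : PySem.Str.join "<br>" (x :: y :: t) ≠ "" := by
  intro h
  have h2 := congrArg String.toList h
  rw [PySem.Str.toList_join] at h2
  simp [PySem.Chars.join_cons_cons] at h2

lemma join_ne_of_two_le (l : List String) (h : 2 ≤ l.length) : PySem.Str.join "<br>" l ≠ "" := by
  rcases l with _ | ⟨x, l1⟩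
  · simp at h
  · rcases l1 with _ | ⟨y, t⟩
    · simp at h
    · exact join_two_ne x y t

lemma clamp_nonneg (L : Nat) (a : Int) (ha : 0 ≤ a) (ha2 : a ≤ (L : Int)) :
    PySem.List.clampIdx L a = a.toNat := by
  unfold PySem.List.clampIdx
  rw [if_neg (by omega)]
  omega

lemma clamp_negwrap (L : Nat) (b : Int) (hb : b < 0) (h2 : 0 ≤ (L : Int) + b) :
    PySem.List.clampIdx L b = ((L : Int) + b).toNat := by
  unfold PySem.List.clampIdx
  rw [if_pos hb, if_neg (by omega)]

-- a positive start with a negative (wrapping, in-range) stop, as drop/take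
lemma slice_wrap (S : List String) (a b : Int) (ha : 0 ≤ a) (hb : b < 0)
    (h2 : 0 ≤ (S.length : Int) + b) (ha2 : a ≤ (S.length : Int)) :
    PySem.List.slice S (some a) (some b)
      = (S.drop a.toNat).take (((S.length : Int) + b).toNat - a.toNat) := by
  simp only [PySem.List.slice]
  rw [clamp_nonneg _ _ ha ha2, clamp_negwrap _ _ hb h2]

-- the wrapped 'after' slice when len + n = 1: exactly one element
lemma slice_wrap_single (S : List String) (n j : Int) (h0 : 0 ≤ j) (hwrap : j + n + 1 < 0)
    (hLn : (S.length : Int) + n = 1) :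
    PySem.List.slice S (some (j + 1)) (some (j + n + 1)) = [S.getD (j + 1).toNat ""] := by
  rw [slice_wrap S (j + 1) (j + n + 1) (by omega) hwrap (by omega) (by omega)]
  have h1 : ((S.length : Int) + (j + n + 1)).toNat - (j + 1).toNat = 1 := by omega
  rw [h1]
  have hlt : (j + 1).toNat < S.length := by omega
  have hdc : S.drop (j + 1).toNat = S[(j + 1).toNat] :: S.drop ((j + 1).toNat + 1) :=
    List.drop_eq_getElem_cons hlt
  rw [hdc, List.take_succ_cons, List.take_zero, List.getD_eq_getElem]

-- B's 'after' entry is always empty for negative n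
lemma aft_entry_neg (S : List String) (n : Int) (hn : n < 0) (i : Int)
    (h1 : 1 ≤ i) (h2 : i < (S.length : Int) - 1) :
    PySem.List.pyGetD ((gcsB_aft n [] S.reverse).reverse) i "" = "" := by
  rw [aft_spec]
  rw [PySem.List.pyGetD_eq_getElem _ "" (by omega) (by simp; omega)]
  rw [List.getElem_reverse]
  simp only [List.length_map, List.length_range, List.getElem_map, List.getElem_range]
  have hN : n.toNat = 0 := by omega
  rw [hN, List.take_zero]
  rfl

-- indexing both ports' common 'lead :: middles ++ tail' shape at a middle position
lemma cons_map_range_get (x : String) (f : Int → String) (E : List String) (B : Int) (j : Nat)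
    (h1 : 1 ≤ j) (h2 : (j : Int) < B) :
    (x :: ((PySem.List.pyRange 1 B 1).map f ++ E))[j]? = some (f (j : Int)) := by
  cases j with
  | zero => omega
  | succ j' =>
    have hlen : ((PySem.List.pyRange 1 B 1).map f).length = (B - 1).toNat := by
      simp [PySem.List.length_pyRange_one]
    have hj' : j' < ((PySem.List.pyRange 1 B 1).map f).length := by rw [hlen]; omega
    rw [List.getElem?_cons_succ, List.getElem?_append_left hj',
      List.getElem?_eq_getElem hj']
    simp only [List.getElem_map, PySem.List.getElem_pyRange_one]
    have harg : (1 + (j' : Int)) = ((j' + 1 : Nat) : Int) := by push_cast; ring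
    rw [harg]

-- extraction: the afters entry at a middle index; B's empty window where A's slice would wrap
lemma aft_get (S : List String) (n : Int) (i : Int) (h1 : 1 ≤ i) (h2 : i < (S.length : Int) - 1)
    (hnd : ¬ D_get_context_for_sentences S n) :
    PySem.List.pyGetD ((gcsB_aft n [] S.reverse).reverse) i ""
      = PySem.Str.join "<br>" (PySem.List.slice S (some (i + 1)) (some (i + n + 1))) := by
  rw [aft_spec]
  rw [PySem.List.pyGetD_eq_getElem _ "" (by omega) (by simp; omega)]
  rw [List.getElem_reverse]
  simp only [List.length_map, List.length_range, List.getElem_map, List.getElem_range]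
  have he : S.length - (S.length - 1 - i.toNat) = i.toNat + 1 := by omega
  rw [he]
  by_cases hn : 0 ≤ n
  · rw [PySem.List.slice_toNat S (by omega) (by omega)]
    have e1 : (i + 1).toNat = i.toNat + 1 := by omega
    have e2 : (i + n + 1).toNat - (i.toNat + 1) = n.toNat := by omega
    rw [e1, e2]
  · have hN : n.toNat = 0 := by omega
    rw [hN, List.take_zero]
    by_cases hb : 0 ≤ i + n + 1
    · rw [PySem.List.slice_toNat S (by omega) (by omega)]
      rw [Nat.sub_eq_zero_of_le (by omega), List.take_zero]
    · have hL3 : 3 ≤ S.length := by omega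
      have hn3 : n ≤ -3 := by omega
      have hlt2 : n < 2 - (S.length : Int) := by
        by_contra hcon
        exact hnd ⟨hL3, hn3, Or.inl (by omega)⟩
      by_cases hn1 : (S.length : Int) + n = 1
      · have hanyf : ¬ (((S.drop 2).take (S.length - 3)).any (fun s => s != "") = true) :=
          fun ha => hnd ⟨hL3, hn3, Or.inr ⟨by omega, ha⟩⟩
        rw [slice_wrap_single S n i (by omega) (by omega) hn1]
        have hkb : (i + 1).toNat - 2 < ((S.drop 2).take (S.length - 3)).length := by
          simp; omega
        have hval : ((S.drop 2).take (S.length - 3))[(i + 1).toNat - 2]'hkb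
            = S.getD (i + 1).toNat "" := by
          simp only [List.getElem_take, List.getElem_drop]
          rw [List.getD_eq_getElem _ _ (by omega)]
          congr 1
          omega
        have hempty : S.getD (i + 1).toNat "" = "" := by
          by_contra hne2
          exact hanyf (List.any_eq_true.mpr ⟨_, hval ▸ List.getElem_mem hkb, by simpa using hne2⟩)
        rw [hempty, join_single]
        rfl
      · have hnL : n ≤ -(S.length : Int) := by omega
        suffices hsl : PySem.List.slice S (some (i + 1)) (some (i + n + 1)) = [] by rw [hsl]
        apply List.eq_nil_of_length_eq_zero
        rw [PySem.List.length_slice]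
        have hm : i + n + 1 = -(((-(i + n + 1)).toNat : Nat) : Int) := by omega
        have hi1 : i + 1 = ((i.toNat + 1 : Nat) : Int) := by omega
        rw [hm, PySem.List.clampIdx_neg_natCast _ _ (by omega), hi1, PySem.List.clampIdx_natCast]
        omega

-- port B computes the reference form, outside D_
lemma alt_eq_ref (S : List String) (n : Int) (hnd : ¬ D_get_context_for_sentences S n) :
    get_context_for_sentences_alt S n = gcsRef S n := by
  cases S with
  | nil => rfl
  | cons s0 rest =>
    cases rest with
    | nil =>
      simp [get_context_for_sentences_alt, gcsRef]
    | cons s1 rs =>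
      have hmap : (PySem.List.pyRange 1 (((s0 :: s1 :: rs).length : Int) - 1) 1).map
          (fun i => PySem.List.pyGetD (gcsB_bef n [] (s0 :: s1 :: rs)) i "" ++ "<br><br>"
            ++ PySem.Int.toStr i ++ " : " ++ PySem.List.pyGetD (s0 :: s1 :: rs) i "" ++ "<br><br>"
            ++ PySem.List.pyGetD ((gcsB_aft n [] (s0 :: s1 :: rs).reverse).reverse) i "")
        = (PySem.List.pyRange 1 (((s0 :: s1 :: rs).length : Int) - 1) 1).map
            (gcsRef_mid (s0 :: s1 :: rs) n) := by
        apply List.map_congr_left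
        intro i hi
        rw [PySem.List.mem_pyRange_one] at hi
        unfold gcsRef_mid
        rw [bef_get _ n i hi.1 hi.2, aft_get _ n i hi.1 hi.2 hnd]
      show ("LEAD : " ++ s0)
          :: (PySem.List.pyRange 1 (((s0 :: s1 :: rs).length : Int) - 1) 1).map
              (fun i => PySem.List.pyGetD (gcsB_bef n [] (s0 :: s1 :: rs)) i "" ++ "<br><br>"
                ++ PySem.Int.toStr i ++ " : " ++ PySem.List.pyGetD (s0 :: s1 :: rs) i ""
                ++ "<br><br>" ++ PySem.List.pyGetD ((gcsB_aft n [] (s0 :: s1 :: rs).reverse).reverse) i "")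
          ++ ["END : " ++ PySem.List.pyGetD (s0 :: s1 :: rs) (-1) ""]
        = ("LEAD : " ++ s0)
          :: (PySem.List.pyRange 1 (((s0 :: s1 :: rs).length : Int) - 1) 1).map
              (gcsRef_mid (s0 :: s1 :: rs) n)
          ++ (if 1 < (s0 :: s1 :: rs).length then
                ["END : " ++ PySem.List.pyGetD (s0 :: s1 :: rs) (-1) ""]
              else [])
      rw [hmap, if_pos (by simp)]

-- ===== VERDICT (by name: the statement is the Claim_ definition above) =====
theorem get_context_for_sentences_spec : Claim_unchanged_get_context_for_sentences := by
  intro sentences n _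
  unfold Spec_get_context_for_sentences
  intro hnd
  rw [A_eq_ref, alt_eq_ref sentences n hnd]

theorem get_context_for_sentences_changed : Claim_changed_get_context_for_sentences := by
  unfold Claim_changed_get_context_for_sentences; decide

theorem get_context_for_sentences_tight : Claim_exact_get_context_for_sentences := by
  intro S n _ hD heq
  obtain ⟨hL3, hn3, hcase⟩ := hD
  rw [A_eq_ref] at heq
  cases S with
  | nil => simp at hL3
  | cons s0 rest =>
    cases rest with
    | nil => simp at hL3
    | cons s1 rs =>
      have key : ∀ j : Nat, 1 ≤ j → (j : Int) < ((s0 :: s1 :: rs).length : Int) - 1 →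
          PySem.Str.join "<br>" (PySem.List.slice (s0 :: s1 :: rs)
            (some ((j : Int) + 1)) (some ((j : Int) + n + 1))) ≠ "" → False := by
        intro j hj1 hjB hne
        have hget : (gcsRef (s0 :: s1 :: rs) n)[j]?
            = (get_context_for_sentences_alt (s0 :: s1 :: rs) n)[j]? := by rw [heq]
        have e1 : gcsRef (s0 :: s1 :: rs) n
            = ("LEAD : " ++ s0)
              :: ((PySem.List.pyRange 1 (((s0 :: s1 :: rs).length : Int) - 1) 1).map
                    (gcsRef_mid (s0 :: s1 :: rs) n)
                ++ (if 1 < (s0 :: s1 :: rs).length then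
                      ["END : " ++ PySem.List.pyGetD (s0 :: s1 :: rs) (-1) ""]
                    else [])) := rfl
        have e2 : get_context_for_sentences_alt (s0 :: s1 :: rs) n
            = ("LEAD : " ++ s0)
              :: ((PySem.List.pyRange 1 (((s0 :: s1 :: rs).length : Int) - 1) 1).map
                    (fun i => PySem.List.pyGetD (gcsB_bef n [] (s0 :: s1 :: rs)) i "" ++ "<br><br>"
                      ++ PySem.Int.toStr i ++ " : " ++ PySem.List.pyGetD (s0 :: s1 :: rs) i ""
                      ++ "<br><br>"
                      ++ PySem.List.pyGetD ((gcsB_aft n [] (s0 :: s1 :: rs).reverse).reverse) i "")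
                ++ ["END : " ++ PySem.List.pyGetD (s0 :: s1 :: rs) (-1) ""]) := rfl
        rw [e1, e2, cons_map_range_get _ _ _ _ j hj1 hjB,
          cons_map_range_get _ _ _ _ j hj1 hjB] at hget
        have hstr := Option.some.inj hget
        simp only [] at hstr
        unfold gcsRef_mid at hstr
        rw [bef_get _ n (j : Int) (by exact_mod_cast hj1) hjB,
          aft_entry_neg _ n (by omega) (j : Int) (by exact_mod_cast hj1) hjB] at hstr
        exact hne (str_cancel _ _ hstr)
      rcases hcase with h2L | ⟨hn1eq, hany⟩
      · -- 2 - len ≤ n: the wrapped slice at idx 1 has ≥ 2 elements, so it contains '<br>'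
        have hL5 : 5 ≤ (s0 :: s1 :: rs).length := by omega
        refine key 1 (by omega) (by push_cast; omega) ?_
        rw [slice_wrap _ (((1 : Nat) : Int) + 1) (((1 : Nat) : Int) + n + 1)
          (by omega) (by push_cast; omega) (by push_cast; omega) (by push_cast; omega)]
        apply join_ne_of_two_le
        simp only [List.length_take, List.length_drop]
        omega
      · -- n = 1 - len: some sentence in positions 2..len-2 is nonempty; the wrapped slice
        -- at the index before it is exactly that sentence
        rw [List.any_eq_true] at hany
        obtain ⟨x, hmem, hxne⟩ := hany
        obtain ⟨k, hk, hxk⟩ := List.getElem_of_mem hmem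
        have hkb : k < (s0 :: s1 :: rs).length - 3 := by
          simp only [List.length_take, List.length_drop] at hk
          omega
        simp only [List.getElem_take, List.getElem_drop] at hxk
        refine key (k + 1) (by omega) (by push_cast; omega) ?_
        rw [slice_wrap_single _ n ((k + 1 : Nat) : Int) (by omega)
          (by push_cast; omega) (by omega), join_single]
        rw [show ((((k + 1 : Nat) : Int)) + 1).toNat = 2 + k from by omega]
        rw [List.getD_eq_getElem _ _ (by omega), hxk]
        simpa using hxne
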